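-- pv_equiv track=rewrite | github.com/Ko-udon/Algorithm | 프로그래머스/lv1/92334. 신고 결과 받기/신고 결과 받기.py | solution
-- ===== SOURCE A (Python) =====
-- def solution(id_list, report, k):
--     answer = []
--
--     # 신고 결과에 따라 메일 받을 횟수를 담을 dict
--     user_result = {}
--     for user in id_list:
--         user_result[user] = 0
--
--     # 신고 결과 담을 dict
--     user_map = {}
--     for user in id_list:
--         user_map[user] = []
--     for r in report:
--         li = r.split(' ')
--         user_map[li[1]].append(li[0])
--
--     # 신고 받은 횟수가 k 이상인 유저들만 정지 대상으로 판별
--     for key, value in user_map.items():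
--         if len(set(value)) >= k:
--             for v in set(value):
--                 user_result[v]+=1
--
--
--     return list(user_result.values())
-- ===== SOURCE B (Python) =====
-- def solution(id_list, report, k):
--     # Dedupe reports into a set of (reporter, victim) pairs, then two counting passes:
--     # count distinct reports per victim, form the banned set, then count mails per reporter.
--     pairs = set()
--     for r in report:
--         li = r.split(' ')
--         pairs.add((li[0], li[1]))
--     victim_count = {u: 0 for u in id_list}
--     for a, b in pairs:
--         victim_count[b] += 1
--     banned = {u for u in id_list if victim_count[u] >= k}
--     mail = {u: 0 for u in id_list}
--     for a, b in pairs: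
--         if b in banned:
--             mail[a] += 1
--     return list(mail.values())
-- ===== Notes on version B (the rewrite author's own statement) =====
-- stated objective: alternative
-- what changed: Replaces A's group-reports-by-victim dict with nested set(value) scans per key by a single dedup of reports into a set of (reporter, victim) pairs followed by two flat counting passes (distinct reports per victim -> banned set -> mail count per reporter).
import Mathlib
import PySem

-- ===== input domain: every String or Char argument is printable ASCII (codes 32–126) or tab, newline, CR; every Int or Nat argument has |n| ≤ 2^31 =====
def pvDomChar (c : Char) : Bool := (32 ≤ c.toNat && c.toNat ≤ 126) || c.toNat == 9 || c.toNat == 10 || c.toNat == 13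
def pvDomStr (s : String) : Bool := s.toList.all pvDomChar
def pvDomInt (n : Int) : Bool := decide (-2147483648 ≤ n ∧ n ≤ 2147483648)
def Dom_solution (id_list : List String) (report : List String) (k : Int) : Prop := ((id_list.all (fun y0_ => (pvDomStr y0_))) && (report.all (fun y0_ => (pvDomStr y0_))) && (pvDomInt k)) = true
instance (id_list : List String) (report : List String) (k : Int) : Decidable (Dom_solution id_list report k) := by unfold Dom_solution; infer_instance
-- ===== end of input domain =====

-- B replaces A's group-by-victim dict with nested set(value) scans by one dedup of the reports
-- into a set of (reporter, victim) pairs and two flat counting passes (alternative decomposition,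
-- same cost); equivalence is about the return value (neither mutates its arguments).

-- ===== PORT A =====
def solution (id_list : List String) (report : List String) (k : Int) : List Int :=
  let user_result : PySem.Dict String Int :=
    id_list.foldl (fun d user => d.insert user 0) PySem.Dict.empty
  let user_map0 : PySem.Dict String (List String) :=
    id_list.foldl (fun d user => d.insert user []) PySem.Dict.empty
  let user_map := report.foldl (fun d r =>
    let li := (PySem.Str.split? r " ").getD []
    d.modify (PySem.List.pyGetD li 1 "") [] (fun v => v ++ [PySem.List.pyGetD li 0 ""])) user_map0
  let user_result := user_map.items.foldl (fun d kv =>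
    if k ≤ (PySem.Set.len (PySem.Set.ofList kv.2) : Int) then
      (PySem.Set.ofList kv.2).foldl (fun d v => d.modify v 0 (· + 1)) d
    else d) user_result
  user_result.values

-- ===== PORT B =====
def solution_alt (id_list : List String) (report : List String) (k : Int) : List Int :=
  let pairs : PySem.Set (String × String) := report.foldl (fun s r =>
    let li := (PySem.Str.split? r " ").getD []
    PySem.Set.add s (PySem.List.pyGetD li 0 "", PySem.List.pyGetD li 1 "")) PySem.Set.empty
  let victim_count : PySem.Dict String Int :=
    id_list.foldl (fun d u => d.insert u 0) PySem.Dict.empty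
  let victim_count := pairs.foldl (fun d p => d.modify p.2 0 (· + 1)) victim_count
  let banned : PySem.Set String :=
    PySem.Set.ofList (id_list.filter (fun u => k ≤ victim_count.getD u 0))
  let mail : PySem.Dict String Int :=
    id_list.foldl (fun d u => d.insert u 0) PySem.Dict.empty
  let mail := pairs.foldl (fun d p =>
    if PySem.Set.contains banned p.2 then d.modify p.1 0 (· + 1) else d) mail
  mail.values

-- ===== PRECONDITION & SPEC =====
def pvParts (r : String) : List String := (PySem.Str.split? r " ").getD []
def pvRep (r : String) : String := (pvParts r).getD 0 ""
def pvVic (r : String) : String := (pvParts r).getD 1 ""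
-- number of DISTINCT reporters of victim b in report
def pvDR (report : List String) (b : String) : Nat :=
  (PySem.List.dedup ((report.filter (fun r => pvVic r == b)).map pvRep)).length
-- Pre_ excludes exactly the inputs where A raises: a report without two space-separated fields
-- (IndexError), a victim outside id_list (KeyError), or a reporter outside id_list whose victim
-- collects ≥ k distinct reports and so gets charged (KeyError).
def Pre_solution (id_list : List String) (report : List String) (k : Int) : Prop :=
  ∀ r ∈ report, 2 ≤ (pvParts r).length ∧ pvVic r ∈ id_list ∧
    (pvRep r ∈ id_list ∨ (pvDR report (pvVic r) : Int) < k)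
instance (id_list : List String) (report : List String) (k : Int) : Decidable (Pre_solution id_list report k) := by
  unfold Pre_solution; infer_instance
def pvWitness_solution : List String × List String × Int :=
  (["muzi", "frodo", "apeach"], ["muzi frodo", "apeach frodo", "muzi apeach"], 2)
def Spec_solution (id_list : List String) (report : List String) (k : Int) (out : List Int) : Prop := out = solution_alt id_list report k
instance (id_list : List String) (report : List String) (k : Int) (out : List Int) : Decidable (Spec_solution id_list report k out) := by unfold Spec_solution; infer_instance

-- ===== CLAIM (what is proved, stated in full; the proofs are below) =====
def Claim_equal_solution : Prop := ∀ (id_list : List String) (report : List String) (k : Int), Dom_solution id_list report k → Pre_solution id_list report k → Spec_solution id_list report k (solution id_list report k)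

-- ===== LEMMAS AND PROOFS =====
-- the parsed reports, as (reporter, victim) pairs, and their dedup (B's pair set)
def pvL (report : List String) : List (String × String) := report.map (fun r => (pvRep r, pvVic r))
def pvP (report : List String) : PySem.Set (String × String) := PySem.Set.ofList (pvL report)
-- the reporters of victim b, in report order (= A's user_map value at b), and their dedup
def pvGroup (report : List String) (b : String) : List String :=
  (report.filter (fun r => pvVic r == b)).map pvRep
def pvS (report : List String) (b : String) : PySem.Set String := PySem.Set.ofList (pvGroup report b)

theorem getD_foldl_insert_const {ν : Type} (l : List String) (z : ν) (d : PySem.Dict String ν)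
    (u : String) (h : d.getD u z = z) :
    (l.foldl (fun d x => d.insert x z) d).getD u z = z := by
  induction l generalizing d with
  | nil => exact h
  | cons x t ih =>
    simp only [List.foldl_cons]
    exact ih _ (by rw [PySem.Dict.getD_insert]; split <;> simp [h])

theorem keys_seed {ν : Type} (l : List String) (z : ν) :
    (l.foldl (fun d x => d.insert x z) (PySem.Dict.empty : PySem.Dict String ν)).keys
      = PySem.Set.ofList l := by
  have := PySem.Dict.keys_foldl_insert l (fun _ _ => z) (PySem.Dict.empty : PySem.Dict String ν)
  simpa [PySem.Set.update, PySem.Set.ofList_eq_foldl] using this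

theorem set_update_self (s : PySem.Set String) (xs : List String) (h : ∀ x ∈ xs, x ∈ s) :
    PySem.Set.update s xs = s := by
  induction xs generalizing s with
  | nil => rfl
  | cons x t ih =>
    have hx : PySem.Set.add s x = s := by
      simp [PySem.Set.add, PySem.Set.contains, h x (by simp)]
    simp only [PySem.Set.update, List.foldl_cons] at *
    rw [hx]
    exact ih s (fun y hy => h y (by simp [hy]))

theorem getD_vicfold (Q : List (String × String)) (d : PySem.Dict String Int) (b : String) :
    (Q.foldl (fun d p => d.modify p.2 0 (· + 1)) d).getD b 0
      = d.getD b 0 + (Q.countP (fun p => p.2 == b) : Int) := by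
  induction Q generalizing d with
  | nil => simp
  | cons p t ih =>
    simp only [List.foldl_cons, List.countP_cons, ih, PySem.Dict.getD_modify]
    by_cases hb : b = p.2
    · subst hb; simp; ring
    · have : (p.2 == b) = false := by simpa using fun h => hb h.symm
      simp [hb, this]

theorem getD_mailfold (c : String × String → Bool) (Q : List (String × String))
    (d : PySem.Dict String Int) (u : String) :
    (Q.foldl (fun d p => if c p then d.modify p.1 0 (· + 1) else d) d).getD u 0
      = d.getD u 0 + ((Q.filter c).countP (fun p => p.1 == u) : Int) := by
  induction Q generalizing d with
  | nil => simp
  | cons p t ih =>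
    simp only [List.foldl_cons, List.filter_cons]
    by_cases hc : c p
    · simp only [hc, if_pos, List.countP_cons, ih, PySem.Dict.getD_modify]
      by_cases hu : u = p.1
      · subst hu; simp; ring
      · have : (p.1 == u) = false := by simpa using fun h => hu h.symm
        simp [hu, this]
    · simp [hc, ih]

theorem keys_incrfold (l : List String) (d : PySem.Dict String Int) (h : ∀ v ∈ l, v ∈ d.keys) :
    (l.foldl (fun d v => d.modify v 0 (· + 1)) d).keys = d.keys := by
  induction l generalizing d with
  | nil => rfl
  | cons x t ih =>
    have hk : (d.modify x 0 (· + 1)).keys = d.keys := by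
      rw [PySem.Dict.keys_modify, PySem.Dict.keys_insert_of_contains]
      exact (PySem.Dict.contains_iff_mem_keys _ _).mpr (h x (by simp))
    simp only [List.foldl_cons]
    rw [ih _ (fun v hv => by rw [hk]; exact h v (by simp [hv])), hk]

theorem keys_mailfold (c : String × String → Bool) (Q : List (String × String))
    (d : PySem.Dict String Int) (h : ∀ p ∈ Q, c p = true → p.1 ∈ d.keys) :
    (Q.foldl (fun d p => if c p then d.modify p.1 0 (· + 1) else d) d).keys = d.keys := by
  induction Q generalizing d with
  | nil => rfl
  | cons p t ih =>
    simp only [List.foldl_cons]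
    by_cases hc : c p
    · have hk : (d.modify p.1 0 (· + 1)).keys = d.keys := by
        rw [PySem.Dict.keys_modify, PySem.Dict.keys_insert_of_contains]
        exact (PySem.Dict.contains_iff_mem_keys _ _).mpr (h p (by simp) hc)
      rw [if_pos hc, ih _ (fun q hq hcq => by rw [hk]; exact h q (by simp [hq]) hcq), hk]
    · rw [if_neg hc]
      exact ih _ (fun q hq hcq => h q (by simp [hq]) hcq)

theorem getD_resfold (k : Int) (S : String → PySem.Set String) (hS : ∀ b, (S b).Nodup)
    (K : List String) (d : PySem.Dict String Int) (u : String) :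
    (K.foldl (fun d b => if k ≤ ((S b).length : Int) then
        (S b).foldl (fun d v => d.modify v 0 (· + 1)) d else d) d).getD u 0
      = d.getD u 0 + (K.countP (fun b => decide (k ≤ ((S b).length : Int)) && decide (u ∈ S b)) : Int) := by
  induction K generalizing d with
  | nil => simp
  | cons b t ih =>
    simp only [List.foldl_cons, List.countP_cons, ih]
    by_cases hb : k ≤ ((S b).length : Int)
    · rw [if_pos hb, PySem.Dict.getD_foldl_modify_add_one]
      by_cases hu : u ∈ S b
      · rw [List.count_eq_one_of_mem (hS b) hu]
        simp [hb, hu]; ring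
      · rw [List.count_eq_zero_of_not_mem hu]
        simp [hb, hu]
    · rw [if_neg hb]
      simp [hb]

theorem keys_resfold (k : Int) (S : String → PySem.Set String) (K : List String)
    (d : PySem.Dict String Int)
    (h : ∀ b ∈ K, k ≤ ((S b).length : Int) → ∀ v ∈ S b, v ∈ d.keys) :
    (K.foldl (fun d b => if k ≤ ((S b).length : Int) then
        (S b).foldl (fun d v => d.modify v 0 (· + 1)) d else d) d).keys = d.keys := by
  induction K generalizing d with
  | nil => rfl
  | cons b t ih =>
    simp only [List.foldl_cons]
    by_cases hb : k ≤ ((S b).length : Int)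
    · have hk : ((S b).foldl (fun d v => d.modify v 0 (· + 1)) d).keys = d.keys :=
        keys_incrfold _ _ (fun v hv => h b (by simp) hb v hv)
      rw [if_pos hb, ih _ (fun b' hb' hkb' v hv => by rw [hk]; exact h b' (by simp [hb']) hkb' v hv), hk]
    · rw [if_neg hb]
      exact ih _ (fun b' hb' hkb' v hv => h b' (by simp [hb']) hkb' v hv)

theorem mem_S_iff (report : List String) (b u : String) :
    u ∈ pvS report b ↔ (u, b) ∈ pvL report := by
  simp only [pvS, pvGroup, pvL, PySem.Set.mem_ofList, List.mem_map, List.mem_filter]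
  constructor
  · rintro ⟨r, ⟨hr, hv⟩, hu⟩
    exact ⟨r, hr, by simp_all⟩
  · rintro ⟨r, hr, he⟩
    injection he with h1 h2
    exact ⟨r, ⟨hr, by simp [h2]⟩, h1⟩

theorem nodup_map_fst (Q : List (String × String)) (b : String) (h : Q.Nodup)
    (h2 : ∀ p ∈ Q, p.2 = b) : (Q.map (·.1)).Nodup := by
  refine h.map_on ?_
  intro x hx y hy hxy
  exact Prod.ext hxy ((h2 x hx).trans (h2 y hy).symm)

theorem nodup_map_snd (Q : List (String × String)) (a : String) (h : Q.Nodup)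
    (h2 : ∀ p ∈ Q, p.1 = a) : (Q.map (·.2)).Nodup := by
  refine h.map_on ?_
  intro x hx y hy hxy
  exact Prod.ext ((h2 x hx).trans (h2 y hy).symm) hxy

theorem S_len (report : List String) (b : String) :
    (pvS report b).length = (pvP report).countP (fun p => p.2 == b) := by
  rw [List.countP_eq_length_filter]
  have hX : (((pvP report).filter (fun p => p.2 == b)).map (·.1)).length
      = ((pvP report).filter (fun p => p.2 == b)).length := List.length_map ..
  rw [← hX]
  refine List.Perm.length_eq ?_
  refine (List.perm_ext_iff_of_nodup (PySem.Set.nodup_ofList _)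
      (nodup_map_fst _ b (((PySem.Set.nodup_ofList _)).filter _) (fun p hp => by
        have := (List.mem_filter.mp hp).2; simpa using this))).mpr ?_
  intro x
  rw [show PySem.Set.ofList (pvGroup report b) = pvS report b from rfl,
      show PySem.Set.ofList (pvL report) = pvP report from rfl, mem_S_iff]
  simp only [List.mem_map, List.mem_filter]
  constructor
  · intro hx
    exact ⟨(x, b), ⟨by rw [pvP, PySem.Set.mem_ofList]; exact hx, by simp⟩, rfl⟩
  · rintro ⟨p, ⟨hp, hb⟩, hx⟩
    have : p = (x, b) := Prod.ext hx (by simpa using hb)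
    rw [← this]
    exact (PySem.Set.mem_ofList _ _).mp hp

theorem pvDR_eq (report : List String) (b : String) :
    pvDR report b = (pvS report b).length := by
  simp [pvDR, pvS, pvGroup, PySem.List.dedup_eq_ofList]

theorem central (report : List String) (id_list : List String) (k : Int) (u : String)
    (hvic : ∀ p ∈ pvL report, p.2 ∈ id_list) :
    (PySem.Set.ofList id_list).countP
        (fun b => decide (k ≤ ((pvS report b).length : Int)) && decide (u ∈ pvS report b))
      = (pvP report).countP
        (fun p => (p.1 == u) && decide (k ≤ ((pvS report p.2).length : Int))) := by
  classical
  set Y : List String := ((pvP report).filter (fun p => p.1 == u)).map (·.2) with hY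
  have hYmem : ∀ b, b ∈ Y ↔ (u, b) ∈ pvP report := by
    intro b
    simp only [hY, List.mem_map, List.mem_filter]
    constructor
    · rintro ⟨p, ⟨hp, hu⟩, hb⟩
      have : p = (u, b) := Prod.ext (by simpa using hu) hb
      exact this ▸ hp
    · intro h; exact ⟨(u, b), ⟨h, by simp⟩, rfl⟩
  have hYnd : Y.Nodup := nodup_map_snd _ u (((PySem.Set.nodup_ofList _)).filter _)
    (fun p hp => by have := (List.mem_filter.mp hp).2; simpa using this)
  -- RHS = countP over Y
  have hrhs : (pvP report).countP (fun p => (p.1 == u) && decide (k ≤ ((pvS report p.2).length : Int)))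
      = Y.countP (fun b => decide (k ≤ ((pvS report b).length : Int))) := by
    rw [hY, List.countP_map]
    rw [List.countP_filter]
    apply List.countP_congr
    intro p _
    simp [Function.comp, Bool.and_comm]
  -- LHS = countP over K.filter (· ∈ Y)
  have hlhs : (PySem.Set.ofList id_list).countP
      (fun b => decide (k ≤ ((pvS report b).length : Int)) && decide (u ∈ pvS report b))
      = ((PySem.Set.ofList id_list).filter (fun b => decide (b ∈ Y))).countP
          (fun b => decide (k ≤ ((pvS report b).length : Int))) := by
    rw [List.countP_filter]
    apply List.countP_congr
    intro b _
    have : (u ∈ pvS report b) ↔ b ∈ Y := by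
      rw [mem_S_iff, hYmem, pvP, PySem.Set.mem_ofList]
    simp [this]
  rw [hrhs, hlhs]
  refine List.Perm.countP_eq _ ?_
  refine (List.perm_ext_iff_of_nodup ((PySem.Set.nodup_ofList _).filter _) hYnd).mpr ?_
  intro b
  simp only [List.mem_filter, PySem.Set.mem_ofList, decide_eq_true_eq]
  constructor
  · rintro ⟨_, hb⟩; exact hb
  · intro hb
    refine ⟨?_, hb⟩
    have := (hYmem b).mp hb
    have := hvic (u, b) ((PySem.Set.mem_ofList _ _).mp this)
    simpa using this


theorem solA_eq (id_list report : List String) (k : Int)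
    (hpre : Pre_solution id_list report k) :
    solution id_list report k = (PySem.Set.ofList id_list).map (fun u =>
      ((PySem.Set.ofList id_list).countP (fun b =>
        decide (k ≤ ((pvS report b).length : Int)) && decide (u ∈ pvS report b)) : Int)) := by
  dsimp only [solution]
  rw [PySem.List.foldl_congr_mem report _
      (fun d r => d.modify (pvVic r) [] (fun v => v ++ [pvRep r])) _
      (by intro acc r _; simp [pvVic, pvRep, pvParts, PySem.List.pyGetD_ofNat'])]
  set X : PySem.Dict String (List String) :=
    id_list.foldl (fun d user => d.insert user []) PySem.Dict.empty with hX
  set umap : PySem.Dict String (List String) :=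
    report.foldl (fun d r => d.modify (pvVic r) [] fun v => v ++ [pvRep r]) X with humap
  have hk0 : X.keys = PySem.Set.ofList id_list := keys_seed id_list []
  have hnd0 : X.keys.Nodup := by
    exact PySem.Dict.nodup_keys_foldl_insert id_list (fun _ _ => []) _ PySem.Dict.nodup_keys_empty
  have hndm : umap.keys.Nodup := by
    exact PySem.Dict.nodup_keys_foldl_modify_key report pvVic []
      (fun _ r => fun v => v ++ [pvRep r]) X hnd0
  have hkm : umap.keys = PySem.Set.ofList id_list := by
    rw [humap]
    rw [PySem.Dict.keys_foldl_modify_key report pvVic [] (fun _ r => fun v => v ++ [pvRep r]) X]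
    rw [hk0]
    refine set_update_self _ _ ?_
    intro x hx
    obtain ⟨r, hr, he⟩ := List.mem_map.mp hx
    rw [PySem.Set.mem_ofList, ← he]
    exact (hpre r hr).2.1
  have hgetD : ∀ b, umap.getD b [] = pvGroup report b := by
    intro b
    have h1 := PySem.Dict.getD_foldl_modify_append
      (report.map (fun r => (pvVic r, pvRep r))) X b
    rw [List.foldl_map] at h1
    dsimp only at h1
    rw [humap, h1, getD_foldl_insert_const id_list [] _ b (PySem.Dict.getD_empty b [])]
    simp [List.filter_map, List.map_map, pvGroup, Function.comp_def]
  rw [PySem.Dict.items_eq_map_keys umap hndm [], hkm, List.foldl_map]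
  dsimp only
  rw [PySem.List.foldl_congr_mem (PySem.Set.ofList id_list) _
      (fun d b => if k ≤ ((pvS report b).length : Int) then
        (pvS report b).foldl (fun d v => d.modify v 0 fun x => x + 1) d else d) _
      (by intro acc b _; rw [hgetD b]; rfl)]
  set R0 : PySem.Dict String Int :=
    id_list.foldl (fun d user => d.insert user 0) PySem.Dict.empty with hR0
  have hndr : R0.keys.Nodup := by
    exact PySem.Dict.nodup_keys_foldl_insert id_list (fun _ _ => 0) _ PySem.Dict.nodup_keys_empty
  have hkr : R0.keys = PySem.Set.ofList id_list := keys_seed id_list 0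
  have hmem : ∀ b ∈ PySem.Set.ofList id_list, k ≤ ((pvS report b).length : Int) →
      ∀ v ∈ pvS report b, v ∈ R0.keys := by
    intro b _ hk v hv
    rw [hkr, PySem.Set.mem_ofList]
    obtain ⟨r, hr, he⟩ := List.mem_map.mp ((mem_S_iff report b v).mp hv)
    injection he with h1 h2
    rcases (hpre r hr).2.2 with h | h
    · rw [← h1]; exact h
    · exfalso; rw [pvDR_eq, h2] at h; omega
  have hkeys := keys_resfold k (pvS report) (PySem.Set.ofList id_list) R0 hmem
  rw [PySem.Dict.values_eq_map_keys _ (by rw [hkeys]; exact hndr) 0, hkeys, hkr]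
  refine List.map_congr_left ?_
  intro u _
  rw [getD_resfold k (pvS report) (fun b => PySem.Set.nodup_ofList _) _ R0 u,
      getD_foldl_insert_const id_list 0 _ u (PySem.Dict.getD_empty u 0), zero_add]


theorem solB_eq (id_list report : List String) (k : Int)
    (hpre : Pre_solution id_list report k) :
    solution_alt id_list report k = (PySem.Set.ofList id_list).map (fun u =>
      ((pvP report).countP (fun p =>
        (p.1 == u) && decide (k ≤ ((pvS report p.2).length : Int))) : Int)) := by
  dsimp only [solution_alt]
  have hpairs : (report.foldl (fun s r =>
      PySem.Set.add s (PySem.List.pyGetD ((PySem.Str.split? r " ").getD []) 0 "",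
        PySem.List.pyGetD ((PySem.Str.split? r " ").getD []) 1 "")) PySem.Set.empty) = pvP report := by
    rw [pvP, PySem.Set.ofList_eq_foldl, pvL, List.foldl_map]
    refine PySem.List.foldl_congr_mem report _ _ _ ?_
    intro acc r _
    simp [pvVic, pvRep, pvParts, PySem.List.pyGetD_ofNat']
  rw [hpairs]
  set V0 : PySem.Dict String Int :=
    id_list.foldl (fun d u => d.insert u 0) PySem.Dict.empty with hV0
  have hvc : ∀ b, ((pvP report).foldl (fun d p => d.modify p.2 0 fun x => x + 1) V0).getD b 0
      = ((pvS report b).length : Int) := by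
    intro b
    rw [getD_vicfold (pvP report) V0 b,
      getD_foldl_insert_const id_list 0 _ b (PySem.Dict.getD_empty b 0), zero_add, S_len]
  rw [List.filter_congr (fun u _ => by rw [hvc u] :
      ∀ u ∈ id_list, decide (k ≤ ((pvP report).foldl (fun d p => d.modify p.2 0 fun x => x + 1) V0).getD u 0)
        = decide (k ≤ ((pvS report u).length : Int)))]
  have hvic : ∀ p ∈ pvP report, p.2 ∈ id_list := by
    intro p hp
    obtain ⟨r, hr, he⟩ := List.mem_map.mp ((PySem.Set.mem_ofList _ _).mp hp)
    rw [← he]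
    exact (hpre r hr).2.1
  have hcon : ∀ p ∈ pvP report,
      (PySem.Set.ofList (id_list.filter (fun u => decide (k ≤ ((pvS report u).length : Int))))).contains p.2
        = decide (k ≤ ((pvS report p.2).length : Int)) := by
    intro p hp
    simp only [PySem.Set.contains, PySem.Set.mem_ofList, List.mem_filter]
    simp [hvic p hp]
  have hrep : ∀ p ∈ pvP report, k ≤ ((pvS report p.2).length : Int) → p.1 ∈ id_list := by
    intro p hp hk
    obtain ⟨r, hr, he⟩ := List.mem_map.mp ((PySem.Set.mem_ofList _ _).mp hp)
    have h1 : p.1 = pvRep r := by rw [← he]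
    have h2 : p.2 = pvVic r := by rw [← he]
    rcases (hpre r hr).2.2 with h | h
    · rw [h1]; exact h
    · exfalso; rw [pvDR_eq, ← h2] at h; omega
  have hndr : V0.keys.Nodup := by
    exact PySem.Dict.nodup_keys_foldl_insert id_list (fun _ _ => 0) _ PySem.Dict.nodup_keys_empty
  have hkr : V0.keys = PySem.Set.ofList id_list := keys_seed id_list 0
  have hkeys := keys_mailfold
    (fun p => (PySem.Set.ofList (id_list.filter (fun u => decide (k ≤ ((pvS report u).length : Int))))).contains p.2)
    (pvP report) V0 (fun p hp hc => by
      dsimp only at hc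
      rw [hkr, PySem.Set.mem_ofList]
      exact hrep p hp (by rw [hcon p hp] at hc; exact of_decide_eq_true hc))
  rw [PySem.Dict.values_eq_map_keys _ (by rw [hkeys]; exact hndr) 0, hkeys, hkr]
  refine List.map_congr_left ?_
  intro u _
  rw [getD_mailfold _ (pvP report) V0 u,
    getD_foldl_insert_const id_list 0 _ u (PySem.Dict.getD_empty u 0), zero_add,
    List.countP_filter]
  have := List.countP_congr (l := pvP report)
    (p := fun p => (p.1 == u) && (PySem.Set.ofList (id_list.filter (fun u => decide (k ≤ ((pvS report u).length : Int))))).contains p.2)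
    (q := fun p => (p.1 == u) && decide (k ≤ ((pvS report p.2).length : Int)))
    (fun p hp => by dsimp only; rw [hcon p hp])
  rw [this]

-- ===== VERDICT (by name: the statement is the Claim_ definition above) =====
theorem solution_spec : Claim_equal_solution := by
  intro id_list report k _hdom hpre
  unfold Spec_solution
  rw [solA_eq id_list report k hpre, solB_eq id_list report k hpre]
  refine List.map_congr_left ?_
  intro u _
  have h := central report id_list k u (fun p hp => by
    simp only [pvL, List.mem_map] at hp
    obtain ⟨r, hr, he⟩ := hp
    rw [← he]
    exact (hpre r hr).2.1)
  exact_mod_cast h
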